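-- pv_equiv track=rewrite | github.com/jithendraB007/Content-Reviewer | backend/pipeline/reviewer.py | compute_overall_status
-- ===== SOURCE A (Python) =====
-- def compute_overall_status(rubric_results: dict) -> str:
--     scores = [v.get("score", "Pass") for v in rubric_results.values()]
--     if "Critical" in scores:
--         return "Rejected"
--     if "Major" in scores:
--         return "Needs Review"
--     if "Error" in scores:
--         return "Needs Review"
--     return "Approved"
-- ===== SOURCE B (Python) =====
-- def compute_overall_status(rubric_results: dict) -> str:
--     severity = {"Critical": 3, "Major": 2, "Error": 2}
--     m = 0
--     for v in rubric_results.values():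
--         m = max(m, severity.get(v.get("score", "Pass"), 0))
--     return {3: "Rejected", 2: "Needs Review"}.get(m, "Approved")
-- ===== Notes on version B (the rewrite author's own statement) =====
-- stated objective: alternative
-- what changed: Single pass computing the maximum severity rank (Critical=3, Major/Error=2, other=0) and mapping that rank to a status, instead of building a scores list and scanning it three times for separate membership tests.
import Mathlib
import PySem

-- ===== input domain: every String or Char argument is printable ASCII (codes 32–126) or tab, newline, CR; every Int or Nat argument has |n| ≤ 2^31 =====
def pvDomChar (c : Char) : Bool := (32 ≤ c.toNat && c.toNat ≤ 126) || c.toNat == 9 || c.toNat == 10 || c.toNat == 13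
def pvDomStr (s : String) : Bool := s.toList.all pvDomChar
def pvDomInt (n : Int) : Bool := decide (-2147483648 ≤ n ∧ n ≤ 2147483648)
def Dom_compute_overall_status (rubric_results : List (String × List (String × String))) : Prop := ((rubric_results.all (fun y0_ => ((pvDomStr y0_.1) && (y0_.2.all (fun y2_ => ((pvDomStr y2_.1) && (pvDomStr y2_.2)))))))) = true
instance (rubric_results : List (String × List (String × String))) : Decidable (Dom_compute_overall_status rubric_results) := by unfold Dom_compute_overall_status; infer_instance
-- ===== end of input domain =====

-- B replaces A's three membership scans over a scores list with one pass taking the maximum severity rank, then maps that rank to a status (alternative decomposition, same cost).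


-- ===== PORT A =====
def compute_overall_status (rubric_results : List (String × List (String × String))) : String :=
  let scores := rubric_results.map (fun v => (PySem.Dict.ofList v.2).getD "score" "Pass")
  if scores.contains "Critical" then "Rejected"
  else if scores.contains "Major" then "Needs Review"
  else if scores.contains "Error" then "Needs Review"
  else "Approved"

-- ===== PORT B =====
-- severity.get(s, 0) from Source B
def pvRank (s : String) : Nat :=
  PySem.Dict.getD (PySem.Dict.ofList [("Critical", 3), ("Major", 2), ("Error", 2)]) s 0

def compute_overall_status_alt (rubric_results : List (String × List (String × String))) : String :=
  let m := rubric_results.foldl (fun m v => max m (pvRank ((PySem.Dict.ofList v.2).getD "score" "Pass"))) 0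
  PySem.Dict.getD (PySem.Dict.ofList [(3, "Rejected"), (2, "Needs Review")]) m "Approved"

-- ===== PRECONDITION & SPEC =====
def Spec_compute_overall_status (rubric_results : List (String × List (String × String))) (out : String) : Prop := out = compute_overall_status_alt rubric_results
instance (rubric_results : List (String × List (String × String))) (out : String) : Decidable (Spec_compute_overall_status rubric_results out) := by unfold Spec_compute_overall_status; infer_instance

-- ===== CLAIM (what is proved, stated in full; the proofs are below) =====
def Claim_equal_compute_overall_status : Prop := ∀ (rubric_results : List (String × List (String × String))), Dom_compute_overall_status rubric_results → Spec_compute_overall_status rubric_results (compute_overall_status rubric_results)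

-- ===== LEMMAS AND PROOFS =====

-- the three-membership chain, as a number (helper for the proof)
def pvSev (scores : List String) : Nat :=
  if "Critical" ∈ scores then 3
  else if "Major" ∈ scores then 2
  else if "Error" ∈ scores then 2
  else 0

-- the Source B severity table, as an if-chain
theorem pvRank_eq (s : String) : pvRank s =
    if s = "Critical" then 3 else if s = "Major" then 2 else if s = "Error" then 2 else 0 := by
  unfold pvRank
  rcases eq_or_ne s "Critical" with h1 | h1
  · subst h1; decide
  rcases eq_or_ne s "Major" with h2 | h2
  · subst h2; decide
  rcases eq_or_ne s "Error" with h3 | h3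
  · subst h3; decide
  rw [PySem.Dict.getD_of_not_contains]
  · simp [h1, h2, h3]
  · simp [PySem.Dict.ofList, PySem.Dict.contains_insert, PySem.Dict.contains_empty, h1, h2, h3,
      PySem.Dict.update]

theorem pvSev_le (l : List String) : pvSev l ≤ 3 := by
  unfold pvSev; split_ifs <;> omega

theorem pvSev_cons (s : String) (l : List String) :
    pvSev (s :: l) = max (pvRank s) (pvSev l) := by
  rw [pvRank_eq]
  have hle := pvSev_le l
  unfold pvSev at *
  rcases eq_or_ne s "Critical" with rfl | h1
  · simp; omega
  rcases eq_or_ne s "Major" with rfl | h2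
  · simp [List.mem_cons]; split_ifs <;> omega
  rcases eq_or_ne s "Error" with rfl | h3
  · simp [List.mem_cons]; split_ifs <;> omega
  · simp [List.mem_cons, Ne.symm h1, Ne.symm h2, Ne.symm h3, h1, h2, h3]

theorem pvFold_eq (l : List (String × List (String × String))) (a : Nat) :
    l.foldl (fun m v => max m (pvRank ((PySem.Dict.ofList v.2).getD "score" "Pass"))) a
      = max a (pvSev (l.map (fun v => (PySem.Dict.ofList v.2).getD "score" "Pass"))) := by
  induction l generalizing a with
  | nil => simp [pvSev]
  | cons x xs ih =>
      rw [List.foldl_cons, ih, List.map_cons, pvSev_cons]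
      omega

-- ===== VERDICT (by name: the statement is the Claim_ definition above) =====
theorem compute_overall_status_spec : Claim_equal_compute_overall_status := by
  intro rr _
  unfold Spec_compute_overall_status compute_overall_status compute_overall_status_alt
  rw [pvFold_eq]
  simp only [Nat.zero_max, pvSev, List.contains_iff_mem]
  split_ifs <;> decide
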